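-- pv_equiv track=rewrite | github.com/Patxi91/CodeWars_Cloud | 6kyu-Arrays Similar-Patxi.py | arrays_similar
-- ===== SOURCE A (Python) =====
-- def arrays_similar(seq1, seq2):
--     if len(seq1) != len(seq2):
--         return False
--
--     count1 = {}
--     count2 = {}
--
--     for item in seq1:
--         count1[item] = count1.get(item, 0) + 1
--
--     for item in seq2:
--         count2[item] = count2.get(item, 0) + 1
--
--     return count1 == count2
-- ===== SOURCE B (Python) =====
-- def arrays_similar(seq1, seq2):
--     count = {}
--     for item in seq1:
--         count[item] = count.get(item, 0) + 1
--     for item in seq2: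
--         c = count.get(item, 0)
--         if c == 0:
--             return False
--         count[item] = c - 1
--     return all(v == 0 for v in count.values())
-- ===== Notes on version B (the rewrite author's own statement) =====
-- stated objective: alternative
-- what changed: Instead of building two frequency dicts and comparing them (after an explicit length check), B builds one frequency dict from seq1 and cancels it against seq2 with early exit on a missing/exhausted item, then checks all counts reached zero; no length check is needed.
import Mathlib
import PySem

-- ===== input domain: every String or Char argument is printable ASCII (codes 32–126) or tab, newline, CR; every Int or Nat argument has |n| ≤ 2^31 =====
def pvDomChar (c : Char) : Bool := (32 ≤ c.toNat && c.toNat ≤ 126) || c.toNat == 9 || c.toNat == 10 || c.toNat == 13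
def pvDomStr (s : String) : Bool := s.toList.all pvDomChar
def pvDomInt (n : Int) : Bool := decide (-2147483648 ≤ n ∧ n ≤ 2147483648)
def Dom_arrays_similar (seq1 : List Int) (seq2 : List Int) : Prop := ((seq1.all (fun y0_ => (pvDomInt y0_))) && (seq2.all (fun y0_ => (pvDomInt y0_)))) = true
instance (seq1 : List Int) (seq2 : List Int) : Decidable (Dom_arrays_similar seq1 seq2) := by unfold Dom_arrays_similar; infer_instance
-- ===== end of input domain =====

-- B replaces A's two-dict build-and-compare (with explicit length check) by a single frequency
-- dict cancelled against seq2 with early exit, then an all-zero check (objective: alternative).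


-- ===== PORT A =====
-- Python's '==' on two dicts: same key set and the same value at every key (order-insensitive).
def pyDictEq (d1 d2 : PySem.Dict Int Int) : Bool :=
  d1.keys.all (fun k => d1.get? k == d2.get? k) &&
  d2.keys.all (fun k => d2.get? k == d1.get? k)

def arrays_similar (seq1 : List Int) (seq2 : List Int) : Bool :=
  if seq1.length ≠ seq2.length then false
  else
    let count1 := seq1.foldl (fun d x => d.insert x (d.getD x 0 + 1)) PySem.Dict.empty
    let count2 := seq2.foldl (fun d x => d.insert x (d.getD x 0 + 1)) PySem.Dict.empty
    pyDictEq count1 count2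

-- ===== PORT B =====
-- the cancellation loop over seq2: none = the Python 'return False' early exit
def altCancel (d : PySem.Dict Int Int) : List Int → Option (PySem.Dict Int Int)
  | [] => some d
  | x :: xs =>
    let c := d.getD x 0
    if c = 0 then none else altCancel (d.insert x (c - 1)) xs

def arrays_similar_alt (seq1 : List Int) (seq2 : List Int) : Bool :=
  let count := seq1.foldl (fun d x => d.insert x (d.getD x 0 + 1)) PySem.Dict.empty
  match altCancel count seq2 with
  | none => false
  | some d => d.values.all (fun v => v == 0)

-- ===== PRECONDITION & SPEC =====
def Spec_arrays_similar (seq1 : List Int) (seq2 : List Int) (out : Bool) : Prop := out = arrays_similar_alt seq1 seq2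
instance (seq1 : List Int) (seq2 : List Int) (out : Bool) : Decidable (Spec_arrays_similar seq1 seq2 out) := by unfold Spec_arrays_similar; infer_instance

-- ===== CLAIM (what is proved, stated in full; the proofs are below) =====
def Claim_equal_arrays_similar : Prop := ∀ (seq1 : List Int) (seq2 : List Int), Dom_arrays_similar seq1 seq2 → Spec_arrays_similar seq1 seq2 (arrays_similar seq1 seq2)

-- ===== LEMMAS AND PROOFS =====

theorem get?_counter (xs : List Int) (v : Int) :
    (PySem.Dict.counter xs).get? v = if v ∈ xs then some ((xs.count v : Int)) else none := by
  by_cases h : v ∈ xs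
  · have hc : (PySem.Dict.counter xs).contains v = true := by
      rw [PySem.Dict.contains_counter]; exact List.contains_iff_mem.mpr h
    rw [PySem.Dict.contains_eq_isSome_get?] at hc
    obtain ⟨w, hw⟩ := Option.isSome_iff_exists.mp hc
    have := PySem.Dict.getD_counter xs v
    rw [PySem.Dict.getD_eq_get?_getD, hw] at this
    simp only [Option.getD_some] at this
    simp [h, hw, this]
  · have hc : (PySem.Dict.counter xs).contains v = false := by
      rw [PySem.Dict.contains_counter]
      simp [h]
    simp [h, (PySem.Dict.get?_eq_none_iff_contains _ _).mpr hc]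

theorem A_iff (s1 s2 : List Int) :
    arrays_similar s1 s2 = true ↔ ∀ v : Int, s1.count v = s2.count v := by
  unfold arrays_similar
  rw [PySem.Dict.foldl_insert_getD_add_one_eq_counter,
      PySem.Dict.foldl_insert_getD_add_one_eq_counter]
  split_ifs with hlen
  · simp only [false_iff]
    intro hall
    exact hlen ((List.perm_iff_count.mpr hall).length_eq)
  · simp only [pyDictEq, Bool.and_eq_true, List.all_eq_true, beq_iff_eq,
      PySem.Dict.keys_counter, PySem.Set.mem_ofList]
    constructor
    · rintro ⟨h1, h2⟩ v
      by_cases hv1 : v ∈ s1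
      · have := h1 v hv1
        rw [get?_counter, get?_counter] at this
        by_cases hv2 : v ∈ s2
        · simp [hv1, hv2] at this; exact_mod_cast this
        · simp [hv1, hv2] at this
      · by_cases hv2 : v ∈ s2
        · have := h2 v hv2
          rw [get?_counter, get?_counter] at this
          simp [hv1, hv2] at this
        · rw [List.count_eq_zero_of_not_mem hv1, List.count_eq_zero_of_not_mem hv2]
    · intro hall
      have hm : ∀ k : Int, (k ∈ s1 ↔ k ∈ s2) := by
        intro k
        rw [← List.count_pos_iff, ← List.count_pos_iff, hall k]
      refine ⟨fun k _ => ?_, fun k _ => ?_⟩ <;>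
        rw [get?_counter, get?_counter, hall k] <;> simp [hm k]

theorem altCancel_none_iff (l : List Int) (d : PySem.Dict Int Int)
    (hpos : ∀ v : Int, 0 ≤ d.getD v 0) :
    altCancel d l = none ↔ ∃ v, d.getD v 0 < l.count v := by
  induction l generalizing d with
  | nil =>
    refine iff_of_false (by simp [altCancel]) ?_
    rintro ⟨v, hv⟩
    have := hpos v
    simp only [List.count_nil, Nat.cast_zero] at hv
    omega
  | cons x xs ih =>
    simp only [altCancel]
    by_cases hc : d.getD x 0 = 0
    · rw [if_pos hc]
      refine iff_of_true rfl ⟨x, ?_⟩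
      rw [hc, List.count_cons_self]
      positivity
    · rw [if_neg hc]
      have hpos' : ∀ v : Int, 0 ≤ (d.insert x (d.getD x 0 - 1)).getD v 0 := by
        intro v
        rw [PySem.Dict.getD_insert]
        split_ifs with h
        · have := hpos x; omega
        · exact hpos v
      rw [ih _ hpos']
      constructor
      · rintro ⟨v, hv⟩
        rw [PySem.Dict.getD_insert] at hv
        by_cases hvx : v = x
        · subst hvx
          rw [if_pos rfl] at hv
          exact ⟨v, by rw [List.count_cons_self]; push_cast; omega⟩
        · rw [if_neg hvx] at hv
          exact ⟨v, by rw [List.count_cons_of_ne (Ne.symm hvx)]; exact hv⟩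
      · rintro ⟨v, hv⟩
        refine ⟨v, ?_⟩
        rw [PySem.Dict.getD_insert]
        by_cases hvx : v = x
        · subst hvx
          rw [List.count_cons_self] at hv
          rw [if_pos rfl]
          push_cast at hv ⊢
          omega
        · rw [if_neg hvx]
          rw [List.count_cons_of_ne (Ne.symm hvx)] at hv
          exact hv

theorem altCancel_some (l : List Int) (d d' : PySem.Dict Int Int)
    (h : altCancel d l = some d') :
    (∀ v, d'.getD v 0 = d.getD v 0 - l.count v) ∧ d'.keys = d.keys := by
  induction l generalizing d with
  | nil =>
    simp only [altCancel, Option.some.injEq] at h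
    subst h
    exact ⟨fun v => by simp, rfl⟩
  | cons x xs ih =>
    simp only [altCancel] at h
    by_cases hc : d.getD x 0 = 0
    · simp [hc] at h
    · rw [if_neg hc] at h
      have hcont : d.contains x = true := by
        by_contra hnc
        exact hc (PySem.Dict.getD_of_not_contains d 0 (Bool.not_eq_true _ ▸ hnc))
      obtain ⟨hval, hkeys⟩ := ih _ h
      refine ⟨fun v => ?_, by rw [hkeys, PySem.Dict.keys_insert_of_contains _ _ hcont]⟩
      rw [hval v, PySem.Dict.getD_insert]
      by_cases hvx : v = x
      · subst hvx
        rw [if_pos rfl, List.count_cons_self]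
        push_cast
        ring
      · rw [if_neg hvx, List.count_cons_of_ne (Ne.symm hvx)]

theorem B_iff (s1 s2 : List Int) :
    arrays_similar_alt s1 s2 = true ↔ ∀ v : Int, s1.count v = s2.count v := by
  have hpos : ∀ v : Int, 0 ≤ (PySem.Dict.counter s1).getD v 0 := by
    intro v
    rw [PySem.Dict.getD_counter]
    positivity
  rcases hres : altCancel (PySem.Dict.counter s1) s2 with _ | d'
  · simp only [arrays_similar_alt, PySem.Dict.foldl_insert_getD_add_one_eq_counter, hres]
    refine iff_of_false (by simp) ?_
    obtain ⟨v, hv⟩ := (altCancel_none_iff s2 (PySem.Dict.counter s1) hpos).mp hres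
    rw [PySem.Dict.getD_counter] at hv
    intro hall
    rw [hall v] at hv
    exact absurd hv (lt_irrefl _)
  · simp only [arrays_similar_alt, PySem.Dict.foldl_insert_getD_add_one_eq_counter, hres]
    obtain ⟨hval, hkeys⟩ := altCancel_some s2 _ _ hres
    have hle : ∀ v : Int, (s2.count v : Int) ≤ s1.count v := by
      intro v
      by_contra hlt
      have hn : altCancel (PySem.Dict.counter s1) s2 = none :=
        (altCancel_none_iff s2 _ hpos).mpr ⟨v, by rw [PySem.Dict.getD_counter]; omega⟩
      rw [hres] at hn
      simp at hn
    have hnd : d'.keys.Nodup := hkeys ▸ PySem.Dict.nodup_keys_counter s1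
    rw [PySem.Dict.values_eq_map_keys d' hnd 0]
    simp only [List.all_eq_true, List.mem_map, beq_iff_eq, forall_exists_index, and_imp,
      forall_apply_eq_imp_iff₂, hkeys, PySem.Dict.keys_counter, PySem.Set.mem_ofList]
    constructor
    · intro hz v
      by_cases hv : v ∈ s1
      · have := hz v hv
        rw [hval v, PySem.Dict.getD_counter] at this
        omega
      · have h1 : s1.count v = 0 := List.count_eq_zero_of_not_mem hv
        have := hle v
        omega
    · intro hall k _
      rw [hval k, PySem.Dict.getD_counter, hall k]
      ring

-- ===== VERDICT (by name: the statement is the Claim_ definition above) =====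
theorem arrays_similar_spec : Claim_equal_arrays_similar := by
  intro s1 s2 _
  unfold Spec_arrays_similar
  by_cases h : ∀ v : Int, s1.count v = s2.count v
  · rw [(A_iff s1 s2).mpr h, (B_iff s1 s2).mpr h]
  · have hA : arrays_similar s1 s2 = false := by
      rw [← Bool.not_eq_true, A_iff]; exact h
    have hB : arrays_similar_alt s1 s2 = false := by
      rw [← Bool.not_eq_true, B_iff]; exact h
    rw [hA, hB]
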